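-- pv_equiv track=rewrite | github.com/stevenmelanson/march-madness | update.py | resolve_team_name
-- ===== SOURCE A (Python) =====
-- def resolve_team_name(espn_name, mapping):
--     """Resolve an ESPN team name to the HTML name used in index.html."""
--     if espn_name in mapping:
--         return mapping[espn_name]
--     # Try stripping common mascot suffixes
--     common_mascots = [
--         " Buckeyes", " Blue Devils", " Wildcats", " Bulldogs", " Hoosiers",
--         " Jayhawks", " Tigers", " Bears", " Cougars", " Gators", " Cavaliers",
--         " Terrapins", " Volunteers", " Cyclones", " Red Raiders", " Crimson Tide",
--         " Razorbacks", " Spartans", " Boilermakers", " Huskies", " Hurricanes",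
--         " Wolverines", " Fighting Illini", " Commodores", " Horned Frogs",
--         " Golden Hurricane", " Red Storm", " Bruins", " Knights", " Panthers",
--         " Broncos", " Zips", " Pride", " Rams", " Trojans", " Aggies",
--         " Paladins", " Flashes", " Highlanders", " Royals", " Bison",
--         " Lancers", " Blackbirds", " Rainbow Warriors", " Cougars",
--         " Cardinals", " Bulls", " Mountaineers", " Hawkeyes",
--     ]
--     for suffix in common_mascots:
--         if espn_name.endswith(suffix):
--             stripped = espn_name[:-len(suffix)]
--             if stripped in mapping:
--                 return mapping[stripped]
--     # Try first word(s) match — but only exact key matches, no substring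
--     # This avoids "Arkansas" matching "Kansas"
--     return None
-- ===== SOURCE B (Python) =====
-- # B: instead of scanning all ~50 mascot suffixes with endswith, derive the only two
-- # possible candidates (last word / last two words) from the name via rsplit and probe
-- # a frozenset of mascot phrases.
-- MASCOTS = frozenset({
--     " Buckeyes", " Blue Devils", " Wildcats", " Bulldogs", " Hoosiers",
--     " Jayhawks", " Tigers", " Bears", " Cougars", " Gators", " Cavaliers",
--     " Terrapins", " Volunteers", " Cyclones", " Red Raiders", " Crimson Tide",
--     " Razorbacks", " Spartans", " Boilermakers", " Huskies", " Hurricanes",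
--     " Wolverines", " Fighting Illini", " Commodores", " Horned Frogs",
--     " Golden Hurricane", " Red Storm", " Bruins", " Knights", " Panthers",
--     " Broncos", " Zips", " Pride", " Rams", " Trojans", " Aggies",
--     " Paladins", " Flashes", " Highlanders", " Royals", " Bison",
--     " Lancers", " Blackbirds", " Rainbow Warriors", " Cougars",
--     " Cardinals", " Bulls", " Mountaineers", " Hawkeyes",
-- })
--
--
-- def resolve_team_name(espn_name, mapping):
--     """Resolve an ESPN team name to the HTML name used in index.html."""
--     if espn_name in mapping:
--         return mapping[espn_name]
--     parts = espn_name.rsplit(' ', 2)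
--     if len(parts) == 3 and ' ' + parts[1] + ' ' + parts[2] in MASCOTS:
--         if parts[0] in mapping:
--             return mapping[parts[0]]
--     if len(parts) >= 2 and ' ' + parts[-1] in MASCOTS:
--         prefix = espn_name[:-len(parts[-1]) - 1]
--         if prefix in mapping:
--             return mapping[prefix]
--     return None
-- ===== Notes on version B (the rewrite author's own statement) =====
-- stated objective: simpler
-- what changed: A scans all ~50 mascot suffixes testing endswith on each; B derives the only two possible candidate suffixes (last word, last two words) from the name via rsplit(' ', 2) and probes a frozenset of mascot phrases, checking the remaining prefix against the mapping.
import Mathlib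
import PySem

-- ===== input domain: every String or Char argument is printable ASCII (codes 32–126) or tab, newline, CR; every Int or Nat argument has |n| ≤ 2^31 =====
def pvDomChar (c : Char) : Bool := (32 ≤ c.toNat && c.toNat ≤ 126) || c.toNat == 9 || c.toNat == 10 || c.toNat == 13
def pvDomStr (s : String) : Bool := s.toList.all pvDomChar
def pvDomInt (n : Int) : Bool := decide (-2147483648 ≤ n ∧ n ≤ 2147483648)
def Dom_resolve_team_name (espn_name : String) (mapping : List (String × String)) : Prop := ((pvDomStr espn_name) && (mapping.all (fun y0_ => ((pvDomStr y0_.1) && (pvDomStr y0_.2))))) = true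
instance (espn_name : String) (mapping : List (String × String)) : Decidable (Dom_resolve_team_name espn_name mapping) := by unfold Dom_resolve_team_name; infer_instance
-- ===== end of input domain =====

-- B replaces A's scan over ~50 mascot suffixes by deriving the only two possible candidate
-- suffixes (last word / last two words) from the name via rsplit and probing a set: simpler decomposition.


-- ===== PORT A =====
-- 'x in mapping' / 'mapping[x]' on the Python dict: first-match lookup in the association list
def pvLookup (mapping : List (String × String)) (k : String) : Option String :=
  PySem.Dict.get? (PySem.Dict.mk mapping) k

-- the literal list 'common_mascots' (a data constant; B's frozenset is built from the same literal)
def pvMascots : List String :=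
  [ " Buckeyes", " Blue Devils", " Wildcats", " Bulldogs", " Hoosiers",
    " Jayhawks", " Tigers", " Bears", " Cougars", " Gators", " Cavaliers",
    " Terrapins", " Volunteers", " Cyclones", " Red Raiders", " Crimson Tide",
    " Razorbacks", " Spartans", " Boilermakers", " Huskies", " Hurricanes",
    " Wolverines", " Fighting Illini", " Commodores", " Horned Frogs",
    " Golden Hurricane", " Red Storm", " Bruins", " Knights", " Panthers",
    " Broncos", " Zips", " Pride", " Rams", " Trojans", " Aggies",
    " Paladins", " Flashes", " Highlanders", " Royals", " Bison",
    " Lancers", " Blackbirds", " Rainbow Warriors", " Cougars",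
    " Cardinals", " Bulls", " Mountaineers", " Hawkeyes" ]

-- 'for suffix in common_mascots: …'
def pvLoopA (espn_name : String) (mapping : List (String × String)) : List String → Option String
  | [] => none
  | suffix :: rest =>
    if PySem.Str.endswith espn_name suffix then
      match pvLookup mapping (PySem.Str.slice espn_name none (some (-(PySem.Str.len suffix)))) with
      | some v => some v
      | none => pvLoopA espn_name mapping rest
    else pvLoopA espn_name mapping rest

def resolve_team_name (espn_name : String) (mapping : List (String × String)) : Option String :=
  match pvLookup mapping espn_name with
  | some v => some v
  | none => pvLoopA espn_name mapping pvMascots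

-- ===== PORT B =====
-- hand port (exact) of one step of str.rsplit(' ', …): split off the part after the LAST space
def pvSplitLast (s : List Char) : Option (List Char × List Char) :=
  match s.reverse.dropWhile (fun c => !(c == ' ')) with
  | [] => none
  | _ :: t => some (t.reverse, (s.reverse.takeWhile (fun c => !(c == ' '))).reverse)

-- hand port (exact) of espn_name.rsplit(' ', 2)
def pvRsplit2 (s : List Char) : List (List Char) :=
  match pvSplitLast s with
  | none => [s]
  | some (p, w) =>
    match pvSplitLast p with
    | none => [p, w]
    | some (q, u) => [q, u, w]

-- MASCOTS = frozenset({… same literal …})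
def pvMascotSet : PySem.Set String := PySem.Set.ofList pvMascots

def resolve_team_name_alt (espn_name : String) (mapping : List (String × String)) : Option String :=
  match pvLookup mapping espn_name with
  | some v => some v
  | none =>
    let parts := pvRsplit2 espn_name.toList
    -- if len(parts) == 3 and ' ' + parts[1] + ' ' + parts[2] in MASCOTS: if parts[0] in mapping: return …
    let step2 : Option String :=
      match parts with
      | [q, u, w] =>
        if pvMascotSet.contains (String.ofList (' ' :: u ++ ' ' :: w)) then
          pvLookup mapping (String.ofList q)
        else none
      | _ => none
    match step2 with
    | some v => some v
    | none =>
      -- if len(parts) >= 2 and ' ' + parts[-1] in MASCOTS: prefix = espn_name[:-len(parts[-1]) - 1]; …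
      match parts.getLast? with
      | some w =>
        if parts.length ≥ 2 && pvMascotSet.contains (String.ofList (' ' :: w)) then
          pvLookup mapping (PySem.Str.slice espn_name none (some (-(w.length : Int) - 1)))
        else none
      | none => none

-- ===== PRECONDITION & SPEC =====
def Spec_resolve_team_name (espn_name : String) (mapping : List (String × String)) (out : Option String) : Prop := out = resolve_team_name_alt espn_name mapping
instance (espn_name : String) (mapping : List (String × String)) (out : Option String) : Decidable (Spec_resolve_team_name espn_name mapping out) := by unfold Spec_resolve_team_name; infer_instance

-- ===== CLAIM (what is proved, stated in full; the proofs are below) =====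
def Claim_equal_resolve_team_name : Prop := ∀ (espn_name : String) (mapping : List (String × String)), Dom_resolve_team_name espn_name mapping → Spec_resolve_team_name espn_name mapping (resolve_team_name espn_name mapping)

-- ===== LEMMAS AND PROOFS =====

theorem pvDwHead {α} {p : α → Bool} {l : List α} {c : α} {t : List α}
    (h : l.dropWhile p = c :: t) : p c = false := by
  induction l with
  | nil => simp at h
  | cons a l ih =>
    by_cases hp : p a
    · simp [hp] at h; exact ih h
    · simp [hp] at h; simpa [h.1] using hp

theorem pvSplitLast_recon {s p w : List Char} (h : pvSplitLast s = some (p, w)) :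
    s = p ++ ' ' :: w ∧ ' ' ∉ w := by
  unfold pvSplitLast at h
  cases hd : s.reverse.dropWhile (fun c => !(c == ' ')) with
  | nil => rw [hd] at h; simp at h
  | cons c t =>
    rw [hd] at h
    simp only [Option.some_inj, Prod.mk.injEq] at h
    have hc : c = ' ' := by have := pvDwHead hd; simpa using this
    have hsplit : s.reverse.takeWhile (fun c => !(c == ' ')) ++ (c :: t) = s.reverse := by
      rw [← hd]; exact List.takeWhile_append_dropWhile
    constructor
    · have : s = s.reverse.reverse := by simp
      rw [this, ← hsplit]
      simp [← h.1, ← h.2, hc]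
    · intro hm
      have h1 : (' ' : Char) ∈ s.reverse.takeWhile (fun c => !(c == ' ')) := by
        rw [← h.2] at hm; simpa using hm
      have := List.mem_takeWhile_imp h1
      simp at this

theorem pvSplitLast_none {s : List Char} : pvSplitLast s = none ↔ ' ' ∉ s := by
  unfold pvSplitLast
  cases hd : s.reverse.dropWhile (fun c => !(c == ' ')) with
  | nil =>
    simp only [hd]
    simp only [List.dropWhile_eq_nil_iff] at hd
    constructor
    · intro _ hm
      have := hd ' ' (by simpa using hm); simp at this
    · intro _; trivial
  | cons c t =>
    simp only [hd]
    constructor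
    · intro h; simp at h
    · intro h
      exfalso
      have hc : c = ' ' := by have := pvDwHead hd; simpa using this
      have h1 : c ∈ s.reverse.dropWhile (fun c => !(c == ' ')) := by rw [hd]; simp
      have h2 : c ∈ s.reverse := List.dropWhile_subset _ h1
      exact h (by simpa [hc] using h2)

theorem pvSplitLast_mk {p w : List Char} (hw : ' ' ∉ w) :
    pvSplitLast (p ++ ' ' :: w) = some (p, w) := by
  unfold pvSplitLast
  have hrev : (p ++ ' ' :: w).reverse = w.reverse ++ ' ' :: p.reverse := by simp
  have hwall : ∀ x ∈ w.reverse, (!(x == ' ')) = true := by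
    intro x hx; simp; rintro rfl; exact hw (by simpa using hx)
  have hdw : (w.reverse ++ ' ' :: p.reverse).dropWhile (fun c => !(c == ' ')) = ' ' :: p.reverse := by
    rw [List.dropWhile_append]
    simp [List.dropWhile_eq_nil_iff.mpr hwall]
  have htw : (w.reverse ++ ' ' :: p.reverse).takeWhile (fun c => !(c == ' ')) = w.reverse := by
    rw [List.takeWhile_append]
    simp [List.takeWhile_eq_self_iff.mpr hwall]
  simp only [hrev, hdw, htw]
  simp

theorem pvEW1 {n w : List Char} (hw : ' ' ∉ w) :
    (' ' :: w) <:+ n ↔ ∃ p, pvSplitLast n = some (p, w) := by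
  constructor
  · rintro ⟨p, rfl⟩
    exact ⟨p, pvSplitLast_mk hw⟩
  · rintro ⟨p, h⟩
    obtain ⟨rfl, -⟩ := pvSplitLast_recon h
    exact ⟨p, rfl⟩

theorem pvEW2 {n u v : List Char} (hu : ' ' ∉ u) (hv : ' ' ∉ v) :
    (' ' :: u ++ ' ' :: v) <:+ n ↔
      ∃ q p, pvSplitLast n = some (q, v) ∧ pvSplitLast q = some (p, u) := by
  constructor
  · rintro ⟨p, rfl⟩
    refine ⟨p ++ ' ' :: u, p, ?_, pvSplitLast_mk hu⟩
    have : p ++ (' ' :: u ++ ' ' :: v) = (p ++ ' ' :: u) ++ ' ' :: v := by simp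
    rw [this]
    exact pvSplitLast_mk hv
  · rintro ⟨q, p, h1, h2⟩
    obtain ⟨rfl, -⟩ := pvSplitLast_recon h1
    obtain ⟨rfl, -⟩ := pvSplitLast_recon h2
    exact ⟨p, by simp⟩

-- shape classifiers (proof-only)
def pvOneW (s : List Char) : Option (List Char) :=
  match s with
  | c :: w => if c = ' ' ∧ ' ' ∉ w then some w else none
  | [] => none

def pvTwoW (s : List Char) : Option (List Char × List Char) :=
  match pvSplitLast s with
  | some (a, v) =>
    match pvOneW a with
    | some u => some (u, v)
    | none => none
  | none => none

theorem pvOneW_recon {s w : List Char} (h : pvOneW s = some w) : s = ' ' :: w ∧ ' ' ∉ w := by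
  unfold pvOneW at h
  cases s with
  | nil => simp at h
  | cons c t =>
    by_cases hc : c = ' ' ∧ ' ' ∉ t
    · simp only [if_pos hc, Option.some_inj] at h
      subst h; exact ⟨by rw [hc.1], hc.2⟩
    · simp [if_neg hc] at h

theorem pvTwoW_recon {s u v : List Char} (h : pvTwoW s = some (u, v)) :
    s = ' ' :: u ++ ' ' :: v ∧ ' ' ∉ u ∧ ' ' ∉ v := by
  unfold pvTwoW at h
  cases hs : pvSplitLast s with
  | none => rw [hs] at h; simp at h
  | some av =>
    obtain ⟨a, v'⟩ := av
    rw [hs] at h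
    cases ho : pvOneW a with
    | none => simp [ho] at h
    | some u' =>
      simp only [ho] at h
      simp only [Option.some_inj, Prod.mk.injEq] at h
      obtain ⟨rfl, rfl⟩ := h
      obtain ⟨rfl, hv⟩ := pvSplitLast_recon hs
      obtain ⟨rfl, hu⟩ := pvOneW_recon ho
      exact ⟨by simp, hu, hv⟩

-- every mascot is one or two spaceless words behind its leading space
theorem pvFactShape : ∀ s ∈ pvMascots, (pvOneW s.toList).isSome ∨ (pvTwoW s.toList).isSome := by
  decide

def pvDisjB : Bool :=
  pvMascots.all (fun s =>
    match pvTwoW s.toList with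
    | some (_, v) => pvMascots.all (fun t =>
        match pvOneW t.toList with
        | some w => v != w
        | none => true)
    | none => true)

theorem pvFactDisjB : pvDisjB = true := by decide

-- no one-word mascot equals the second word of a two-word mascot
theorem pvFactDisj : ∀ s ∈ pvMascots, ∀ t ∈ pvMascots, ∀ u v w,
    pvTwoW s.toList = some (u, v) → pvOneW t.toList = some w → v ≠ w := by
  intro s hs t ht u v w h2 h1
  have hb := pvFactDisjB
  unfold pvDisjB at hb
  rw [List.all_eq_true] at hb
  have hs' := hb s hs
  rw [h2] at hs'
  rw [List.all_eq_true] at hs'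
  have ht' := hs' t ht
  rw [h1] at ht'
  simpa using ht'

theorem pvEmptyNotMem : ("" : String) ∉ pvMascots := by decide

-- A's loop when every matching suffix equals one candidate c
theorem pvLoopA_uniq (n : String) (m : List (String × String)) (c : String) (L : List String)
    (h : ∀ s ∈ L, PySem.Str.endswith n s = true → s = c) :
    pvLoopA n m L =
      if c ∈ L ∧ PySem.Str.endswith n c = true
      then pvLookup m (PySem.Str.slice n none (some (-(PySem.Str.len c))))
      else none := by
  induction L with
  | nil => simp [pvLoopA]
  | cons s rest ih =>
    have ih' := ih (fun t ht he => h t (List.mem_cons_of_mem _ ht) he)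
    by_cases he : PySem.Str.endswith n s = true
    · have hsc : s = c := h s (List.mem_cons_self) he
      subst hsc
      have he' : PySem.Chars.endswith n.toList s.toList = true := by simpa using he
      rw [pvLoopA]
      rw [if_pos he]
      cases hl : pvLookup m (PySem.Str.slice n none (some (-(PySem.Str.len s)))) with
      | some v =>
        have hl' : pvLookup m (PySem.Str.slice n none (some (-(s.length : Int)))) = some v := by
          simpa using hl
        simp [he', hl', List.mem_cons_self]
      | none =>
        have hl' : pvLookup m (PySem.Str.slice n none (some (-(s.length : Int)))) = none := by
          simpa using hl
        rw [ih']
        by_cases hm : s ∈ rest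
        · simp [hm, he', hl', List.mem_cons_self]
        · simp [hm, he', hl', List.mem_cons_self]
    · rw [pvLoopA, if_neg he, ih']
      by_cases hc : c ∈ rest ∧ PySem.Str.endswith n c = true
      · rw [if_pos hc, if_pos ⟨List.mem_cons_of_mem _ hc.1, hc.2⟩]
      · rw [if_neg hc]
        rw [if_neg ?_]
        rintro ⟨hmem, hec⟩
        rcases List.mem_cons.mp hmem with rfl | hmem
        · exact he hec
        · exact hc ⟨hmem, hec⟩

theorem pvMemSet (c : String) : c ∈ pvMascotSet ↔ c ∈ pvMascots :=
  PySem.Set.mem_ofList pvMascots c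

-- membership in the frozenset port
theorem pvContains_iff (c : String) : pvMascotSet.contains c = true ↔ c ∈ pvMascots := by
  have h1 : pvMascotSet.contains c = true ↔ c ∈ pvMascotSet := by
    simp [PySem.Set.contains]
  rw [h1]
  exact PySem.Set.mem_ofList pvMascots c

-- a matching mascot is the one-word candidate (when the last word is w1) …
theorem pvMatch_char (espn : String) (s : String) (hs : s ∈ pvMascots)
    (he : PySem.Str.endswith espn s = true) {p1 w1 : List Char}
    (hn : pvSplitLast espn.toList = some (p1, w1)) :
    s = String.ofList (' ' :: w1) ∨
      ∃ q u1, pvSplitLast p1 = some (q, u1) ∧ s = String.ofList (' ' :: u1 ++ ' ' :: w1) := by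
  have hsuf : s.toList <:+ espn.toList := by
    have := PySem.Chars.endswith_iff (s := espn.toList) (p := s.toList)
    exact this.mp (by simpa using he)
  rcases pvFactShape s hs with h1 | h2
  · obtain ⟨w, hw⟩ := Option.isSome_iff_exists.mp h1
    obtain ⟨hsl, hwsp⟩ := pvOneW_recon hw
    rw [hsl] at hsuf
    obtain ⟨p, hp⟩ := (pvEW1 hwsp).mp hsuf
    rw [hn] at hp
    simp only [Option.some_inj, Prod.mk.injEq] at hp
    left
    apply String.toList_inj.mp
    rw [hsl, hp.2]
    simp
  · obtain ⟨⟨u, v⟩, hw⟩ := Option.isSome_iff_exists.mp h2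
    obtain ⟨hsl, hu, hv⟩ := pvTwoW_recon hw
    rw [hsl] at hsuf
    obtain ⟨q', p', h1', h2'⟩ := (pvEW2 hu hv).mp hsuf
    rw [hn] at h1'
    simp only [Option.some_inj, Prod.mk.injEq] at h1'
    right
    refine ⟨p', u, ?_, ?_⟩
    · rw [h1'.1]; exact h2'
    · apply String.toList_inj.mp
      rw [hsl, ← h1'.2]
      simp

-- ===== VERDICT (by name: the statement is the Claim_ definition above) =====
theorem resolve_team_name_spec : Claim_equal_resolve_team_name := by
  intro espn m _
  show resolve_team_name espn m = resolve_team_name_alt espn m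
  unfold resolve_team_name resolve_team_name_alt
  cases h0 : pvLookup m espn with
  | some v => simp
  | none =>
    simp only []
    cases hn : pvSplitLast espn.toList with
    | none =>
      -- no space in the name: no mascot suffix can match, and rsplit yields one part
      have hA : ∀ s ∈ pvMascots, PySem.Str.endswith espn s = true → s = "" := by
        intro s hs he
        exfalso
        have hsuf : s.toList <:+ espn.toList := by
          have := PySem.Chars.endswith_iff (s := espn.toList) (p := s.toList)
          exact this.mp (by simpa using he)
        have hsp : ' ' ∈ s.toList := by
          rcases pvFactShape s hs with h1 | h2
          · obtain ⟨w, hw⟩ := Option.isSome_iff_exists.mp h1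
            obtain ⟨hsl, -⟩ := pvOneW_recon hw
            rw [hsl]; simp
          · obtain ⟨⟨u, v⟩, hw⟩ := Option.isSome_iff_exists.mp h2
            obtain ⟨hsl, -, -⟩ := pvTwoW_recon hw
            rw [hsl]; simp
        exact (pvSplitLast_none.mp hn) (hsuf.subset hsp)
      rw [pvLoopA_uniq espn m "" pvMascots hA,
        if_neg (by simp [pvEmptyNotMem])]
      simp [pvRsplit2, hn]
    | some pw =>
      obtain ⟨p1, w1⟩ := pw
      obtain ⟨hnp, hw1⟩ := pvSplitLast_recon hn
      have heC1 : PySem.Str.endswith espn (String.ofList (' ' :: w1)) = true := by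
        have h1 : (' ' :: w1) <:+ espn.toList := ⟨p1, hnp.symm⟩
        have h2 := (PySem.Chars.endswith_iff (s := espn.toList) (p := ' ' :: w1)).mpr h1
        simpa using h2
      have hlen1 : PySem.Str.len (String.ofList (' ' :: w1)) = (w1.length : Int) + 1 := by
        simp
      have hslice1 : PySem.Str.slice espn none (some (-(PySem.Str.len (String.ofList (' ' :: w1))))) =
          PySem.Str.slice espn none (some (-(w1.length : Int) - 1)) := by
        rw [hlen1]; ring_nf
      cases hq : pvSplitLast p1 with
      | none =>
        have hAll : ∀ s ∈ pvMascots, PySem.Str.endswith espn s = true →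
            s = String.ofList (' ' :: w1) := by
          intro s hs he
          rcases pvMatch_char espn s hs he hn with h | ⟨q', u', hsp, -⟩
          · exact h
          · rw [hq] at hsp; exact absurd hsp (by simp)
        rw [pvLoopA_uniq espn m (String.ofList (' ' :: w1)) pvMascots hAll]
        by_cases hC1 : String.ofList (' ' :: w1) ∈ pvMascots
        · rw [if_pos ⟨hC1, heC1⟩, hslice1]
          simp [pvRsplit2, hn, hq, pvMemSet, hC1]
        · rw [if_neg (by tauto)]
          simp [pvRsplit2, hn, hq, pvMemSet, hC1]
      | some qu =>
        obtain ⟨q, u1⟩ := qu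
        obtain ⟨hp1, hu1⟩ := pvSplitLast_recon hq
        have hnq : espn.toList = q ++ (' ' :: u1 ++ ' ' :: w1) := by
          rw [hnp, hp1]; simp
        have heC2 : PySem.Str.endswith espn (String.ofList (' ' :: u1 ++ ' ' :: w1)) = true := by
          have h1 : (' ' :: u1 ++ ' ' :: w1) <:+ espn.toList := ⟨q, hnq.symm⟩
          have h2 := (PySem.Chars.endswith_iff (s := espn.toList) (p := ' ' :: u1 ++ ' ' :: w1)).mpr h1
          simpa using h2
        have hTwoW : pvTwoW (String.ofList (' ' :: u1 ++ ' ' :: w1)).toList = some (u1, w1) := by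
          have hass : (' ' :: u1 ++ ' ' :: w1 : List Char) = (' ' :: u1) ++ ' ' :: w1 := by simp
          have hsl : pvSplitLast ((' ' :: u1) ++ ' ' :: w1) = some (' ' :: u1, w1) :=
            pvSplitLast_mk hw1
          have how : pvOneW (' ' :: u1) = some u1 := by
            simp [pvOneW, hu1]
          unfold pvTwoW
          rw [String.toList_ofList, hass, hsl]
          simp [how]
        have hOneW1 : pvOneW (String.ofList (' ' :: w1)).toList = some w1 := by
          rw [String.toList_ofList]
          simp [pvOneW, hw1]
        by_cases hC2 : String.ofList (' ' :: u1 ++ ' ' :: w1) ∈ pvMascots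
        · have hC1not : String.ofList (' ' :: w1) ∉ pvMascots := by
            intro hC1
            exact pvFactDisj _ hC2 _ hC1 u1 w1 w1 hTwoW hOneW1 rfl
          have hAll : ∀ s ∈ pvMascots, PySem.Str.endswith espn s = true →
              s = String.ofList (' ' :: u1 ++ ' ' :: w1) := by
            intro s hs he
            rcases pvMatch_char espn s hs he hn with h | ⟨q', u', hsp, hval⟩
            · rw [h] at hs; exact absurd hs hC1not
            · rw [hq] at hsp
              simp only [Option.some_inj, Prod.mk.injEq] at hsp
              rw [hval, hsp.2]
          rw [pvLoopA_uniq espn m _ pvMascots hAll, if_pos ⟨hC2, heC2⟩]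
          have hlen2 : PySem.Str.len (String.ofList (' ' :: u1 ++ ' ' :: w1)) =
              ((u1.length + w1.length + 2 : Nat) : Int) := by
            simp; omega
          have hsliceq : PySem.Str.slice espn none
              (some (-(PySem.Str.len (String.ofList (' ' :: u1 ++ ' ' :: w1))))) =
              String.ofList q := by
            apply String.toList_inj.mp
            rw [hlen2]
            have hk : (0 : Nat) < u1.length + w1.length + 2 := by omega
            have := PySem.List.slice_to_neg_natCast (xs := espn.toList)
              (k := u1.length + w1.length + 2) hk
            simp only [PySem.Str.toList_slice, PySem.Chars.slice_eq_listSlice]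
            rw [this, String.toList_ofList]
            rw [hnq]
            have hlenq : (q ++ (' ' :: u1 ++ ' ' :: w1)).length - (u1.length + w1.length + 2) =
                q.length := by simp; omega
            rw [hlenq]
            exact List.take_left ..
          rw [hsliceq]
          simp only [pvRsplit2, hn, hq]
          simp only [pvContains_iff]
          rw [if_pos ?_]
          · cases hlq : pvLookup m (String.ofList q) with
            | some v => simp
            | none =>
              simp [pvMemSet]
              intro h
              exact absurd h hC1not
          · simpa [pvMemSet] using hC2
        · have hAll : ∀ s ∈ pvMascots, PySem.Str.endswith espn s = true →
              s = String.ofList (' ' :: w1) := by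
            intro s hs he
            rcases pvMatch_char espn s hs he hn with h | ⟨q', u', hsp, hval⟩
            · exact h
            · exfalso
              rw [hq] at hsp
              simp only [Option.some_inj, Prod.mk.injEq] at hsp
              rw [hval, ← hsp.2] at hs
              exact hC2 hs
          have hC2' : String.ofList (' ' :: (u1 ++ ' ' :: w1)) ∉ pvMascots := by
            simpa using hC2
          rw [pvLoopA_uniq espn m _ pvMascots hAll]
          by_cases hC1 : String.ofList (' ' :: w1) ∈ pvMascots
          · rw [if_pos ⟨hC1, heC1⟩, hslice1]
            simp [pvRsplit2, hn, hq, pvMemSet, hC1, hC2']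
          · rw [if_neg (by tauto)]
            simp [pvRsplit2, hn, hq, pvMemSet, hC1, hC2']
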